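-- pv_equiv track=rewrite | github.com/SleepingDawn/paper_download | tools_exp.py | _is_recommended_or_related_blob
-- ===== SOURCE A (Python) =====
-- def _is_recommended_or_related_blob(blob: str) -> bool:
--     low = str(blob or "").lower()
--     bad_tokens = (
--         "recommended",
--         "related",
--         "suggested",
--         "other users also viewed",
--         "reading assistant",
--         "questions you could ask",
--         "actions you could take",
--         "summarize this article",
--         "summarize experiments",
--         "similar article",
--         "you may also like",
--         "more like this",
--     )
--     return any(tok in low for tok in bad_tokens)
-- ===== SOURCE B (Python) =====
-- def _is_recommended_or_related_blob(blob: str) -> bool: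
--     low = str(blob or "").lower()
--     bad_tokens = (
--         "recommended",
--         "related",
--         "suggested",
--         "other users also viewed",
--         "reading assistant",
--         "questions you could ask",
--         "actions you could take",
--         "summarize this article",
--         "summarize experiments",
--         "similar article",
--         "you may also like",
--         "more like this",
--     )
--     return any(low.startswith(bad_tokens, i) for i in range(len(low)))
-- ===== Notes on version B (the rewrite author's own statement) =====
-- stated objective: alternative
-- what changed: B makes one left-to-right scan of the lowercased string, testing at each position whether any blacklisted token starts there (tuple-argument startswith), instead of A's twelve independent membership substring searches.
import Mathlib
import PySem

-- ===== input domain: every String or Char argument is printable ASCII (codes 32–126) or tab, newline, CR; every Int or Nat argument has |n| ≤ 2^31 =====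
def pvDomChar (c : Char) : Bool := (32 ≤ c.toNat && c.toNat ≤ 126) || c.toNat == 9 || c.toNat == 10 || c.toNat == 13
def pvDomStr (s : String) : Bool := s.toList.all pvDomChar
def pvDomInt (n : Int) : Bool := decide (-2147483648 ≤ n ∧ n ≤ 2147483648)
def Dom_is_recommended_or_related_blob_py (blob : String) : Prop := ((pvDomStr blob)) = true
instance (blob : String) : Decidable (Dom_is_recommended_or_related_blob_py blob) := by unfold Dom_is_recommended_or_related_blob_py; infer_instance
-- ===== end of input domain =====

-- B replaces A's 12 independent 'tok in low' substring searches by one left-to-right scan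
-- that tests at each position whether some blacklisted token starts there (objective: alternative).

-- the blacklist tuple, shared data of both programs
def pvBadTokens : List String :=
  [ "recommended", "related", "suggested", "other users also viewed",
    "reading assistant", "questions you could ask", "actions you could take",
    "summarize this article", "summarize experiments", "similar article",
    "you may also like", "more like this" ]

-- ===== PORT A =====
def is_recommended_or_related_blob_py (blob : String) : Bool :=
  -- low = str(blob or "").lower()  ('blob or ""' is blob unless blob is empty/falsy)
  let low := PySem.Str.lower (if blob = "" then "" else blob)
  -- return any(tok in low for tok in bad_tokens)
  pvBadTokens.any (fun tok => PySem.Str.isIn tok low)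

-- ===== PORT B =====
-- any(low.startswith(bad_tokens, i) for i in range(len(low))): scan over the suffixes of low
def pvScanBad (toks : List String) : List Char → Bool
  | [] => false
  | c :: rest =>
      toks.any (fun tok => PySem.Chars.startswith (c :: rest) tok.toList) || pvScanBad toks rest

def is_recommended_or_related_blob_py_alt (blob : String) : Bool :=
  let low := PySem.Str.lower (if blob = "" then "" else blob)
  pvScanBad pvBadTokens low.toList

-- ===== PRECONDITION & SPEC =====
def Spec_is_recommended_or_related_blob_py (blob : String) (out : Bool) : Prop := out = is_recommended_or_related_blob_py_alt blob
instance (blob : String) (out : Bool) : Decidable (Spec_is_recommended_or_related_blob_py blob out) := by unfold Spec_is_recommended_or_related_blob_py; infer_instance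

-- ===== CLAIM (what is proved, stated in full; the proofs are below) =====
def Claim_equal_is_recommended_or_related_blob_py : Prop := ∀ (blob : String), Dom_is_recommended_or_related_blob_py blob → Spec_is_recommended_or_related_blob_py blob (is_recommended_or_related_blob_py blob)

-- ===== LEMMAS AND PROOFS =====

-- the suffix scan finds a (nonempty) token iff some token is an infix, i.e. iff 'tok in low'
lemma pvScanBad_eq (toks : List String) (h : ∀ t ∈ toks, t.toList ≠ []) (l : List Char) :
    pvScanBad toks l = toks.any (fun tok => PySem.Chars.isIn tok.toList l) := by
  induction l with
  | nil =>
    simp only [pvScanBad]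
    symm
    rw [List.any_eq_false]
    intro t ht
    rw [Bool.not_eq_true, PySem.Chars.isIn_eq_false_iff]
    intro hinf
    exact h t ht (List.eq_nil_of_infix_nil hinf)
  | cons c rest ih =>
    simp only [pvScanBad, ih]
    rw [Bool.eq_iff_iff]
    simp only [Bool.or_eq_true, List.any_eq_true, PySem.Chars.startswith_iff,
      PySem.Chars.isIn_iff_infix, List.infix_cons_iff]
    constructor
    · rintro (⟨t, ht, hp⟩ | ⟨t, ht, hs⟩)
      · exact ⟨t, ht, Or.inl hp⟩
      · exact ⟨t, ht, Or.inr hs⟩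
    · rintro ⟨t, ht, hp | hs⟩
      · exact Or.inl ⟨t, ht, hp⟩
      · exact Or.inr ⟨t, ht, hs⟩

-- ===== VERDICT (by name: the statement is the Claim_ definition above) =====
theorem is_recommended_or_related_blob_py_spec : Claim_equal_is_recommended_or_related_blob_py := by
  intro blob _
  unfold Spec_is_recommended_or_related_blob_py
  unfold is_recommended_or_related_blob_py is_recommended_or_related_blob_py_alt
  simp only []
  rw [pvScanBad_eq pvBadTokens (by decide)]
  simp [PySem.Str.isIn]
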